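-- pv_equiv track=rewrite | github.com/pasha1442/c_demo | chat/services/chat_history_manager/in_memory_chat_history_service.py | _refresh_chat_after_keyword
-- ===== SOURCE A (Python) =====
-- def _refresh_chat_after_keyword(chat_history, chat_data, conversation_session_context_refresh_keyword):
--     keywords = [
--         keyword.strip().lower()
--         for keyword in conversation_session_context_refresh_keyword.split(",")
--     ]
--     latest_hello_index = next(
--         (index for index in range(len(chat_history) - 1, -1, -1)
--         if chat_history[index].get("role") == "user" and
--         any(keyword in chat_history[index].get("content", "").lower() for keyword in keywords)),
--         None
--     )
--     if latest_hello_index is not None: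
--         chat_history = chat_history[latest_hello_index:]
--
--     return chat_history
-- ===== SOURCE B (Python) =====
-- def _refresh_chat_after_keyword(chat_history, chat_data, conversation_session_context_refresh_keyword):
--     keywords = [
--         keyword.strip().lower()
--         for keyword in conversation_session_context_refresh_keyword.split(",")
--     ]
--     # Build the answer back-to-front: walk the reversed history, collecting
--     # messages until the first matching user message (inclusive), then flip.
--     collected = []
--     for message in reversed(chat_history):
--         collected.append(message)
--         if message.get("role") == "user" and any(
--             keyword in message.get("content", "").lower() for keyword in keywords
--         ):
--             collected.reverse()
--             return collected
--     return chat_history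
-- ===== Notes on version B (the rewrite author's own statement) =====
-- stated objective: alternative
-- what changed: Instead of computing a last-match index and slicing, B builds the output back-to-front: it walks the reversed history collecting messages into a buffer until the first matching user message inclusive, then reverses the buffer; no indices or slicing are used.
import Mathlib
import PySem

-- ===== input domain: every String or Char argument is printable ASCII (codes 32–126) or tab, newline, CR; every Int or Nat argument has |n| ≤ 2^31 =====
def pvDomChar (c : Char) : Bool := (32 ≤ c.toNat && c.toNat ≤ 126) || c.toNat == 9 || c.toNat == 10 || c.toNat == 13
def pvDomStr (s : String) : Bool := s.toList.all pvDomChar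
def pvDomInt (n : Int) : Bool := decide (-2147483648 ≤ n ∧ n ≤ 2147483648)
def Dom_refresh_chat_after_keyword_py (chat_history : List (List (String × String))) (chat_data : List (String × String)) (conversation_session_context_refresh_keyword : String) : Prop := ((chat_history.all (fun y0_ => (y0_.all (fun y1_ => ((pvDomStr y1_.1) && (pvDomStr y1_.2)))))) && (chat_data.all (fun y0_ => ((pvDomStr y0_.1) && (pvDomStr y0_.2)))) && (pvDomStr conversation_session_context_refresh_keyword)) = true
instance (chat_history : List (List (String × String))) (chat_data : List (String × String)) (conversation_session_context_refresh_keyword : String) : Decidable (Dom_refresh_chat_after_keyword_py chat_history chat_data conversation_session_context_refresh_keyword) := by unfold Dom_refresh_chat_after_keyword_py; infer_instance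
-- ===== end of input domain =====

-- B replaces A's index search + slice by building the output back-to-front over the
-- reversed history (collect until first hit inclusive, then reverse); same return value,
-- proved equivalent (no speed claim).

-- shared helpers (identical subexpressions of both Pythons):
-- message.get("role") == "user" and any(kw in message.get("content","").lower() for kw in keywords)
def rck_hit (kws : List String) (msg : List (String × String)) : Bool :=
  (List.lookup "role" msg == some "user") &&
  kws.any (fun kw => PySem.Str.isIn kw (PySem.Str.lower ((List.lookup "content" msg).getD "")))

-- [k.strip().lower() for k in s.split(",")]  (sep "," ≠ "", so split? is always some)
def rck_keywords (s : String) : List String :=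
  ((PySem.Str.split? s ",").getD []).map (fun k => PySem.Str.lower (PySem.Str.strip k))

-- ===== PORT A =====
-- backward generator scan: next((i for i in range(len-1,-1,-1) if hit), None); fuel = i+1
def rckA_scan (h : List (List (String × String))) (kws : List String) : Nat → Option Int
  | 0 => none
  | n+1 => if rck_hit kws (h[n]?.getD []) then some (n : Int) else rckA_scan h kws n

def refresh_chat_after_keyword_py (chat_history : List (List (String × String))) (chat_data : List (String × String)) (conversation_session_context_refresh_keyword : String) : List (List (String × String)) :=
  let keywords := rck_keywords conversation_session_context_refresh_keyword
  match rckA_scan chat_history keywords chat_history.length with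
  | some i => PySem.List.slice chat_history (some i) none
  | none => chat_history

-- ===== PORT B =====
-- the loop over reversed(chat_history): collect each message; on the first hit return
-- the collected prefix (some); fall off the end → none (then B returns chat_history)
def rckB_collect (kws : List String) : List (List (String × String)) → Option (List (List (String × String)))
  | [] => none
  | m :: rest =>
      if rck_hit kws m then some [m]
      else (rckB_collect kws rest).map (fun l => m :: l)

def refresh_chat_after_keyword_py_alt (chat_history : List (List (String × String))) (chat_data : List (String × String)) (conversation_session_context_refresh_keyword : String) : List (List (String × String)) :=
  let keywords := rck_keywords conversation_session_context_refresh_keyword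
  match rckB_collect keywords chat_history.reverse with
  | some collected => collected.reverse
  | none => chat_history

-- ===== PRECONDITION & SPEC =====
def Spec_refresh_chat_after_keyword_py (chat_history : List (List (String × String))) (chat_data : List (String × String)) (conversation_session_context_refresh_keyword : String) (out : List (List (String × String))) : Prop := out = refresh_chat_after_keyword_py_alt chat_history chat_data conversation_session_context_refresh_keyword
instance (chat_history : List (List (String × String))) (chat_data : List (String × String)) (conversation_session_context_refresh_keyword : String) (out : List (List (String × String))) : Decidable (Spec_refresh_chat_after_keyword_py chat_history chat_data conversation_session_context_refresh_keyword out) := by unfold Spec_refresh_chat_after_keyword_py; infer_instance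

-- ===== CLAIM (what is proved, stated in full; the proofs are below) =====
def Claim_equal_refresh_chat_after_keyword_py : Prop := ∀ (chat_history : List (List (String × String))) (chat_data : List (String × String)) (conversation_session_context_refresh_keyword : String), Dom_refresh_chat_after_keyword_py chat_history chat_data conversation_session_context_refresh_keyword → Spec_refresh_chat_after_keyword_py chat_history chat_data conversation_session_context_refresh_keyword (refresh_chat_after_keyword_py chat_history chat_data conversation_session_context_refresh_keyword)

-- ===== LEMMAS AND PROOFS =====

-- A's scan with fuel n returns an index in [0, n)
lemma rckA_scan_lt (h : List (List (String × String))) (kws : List String) :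
    ∀ n i, rckA_scan h kws n = some i → ∃ j : Nat, i = (j : Int) ∧ j < n := by
  intro n
  induction n with
  | zero => intro i hi; simp [rckA_scan] at hi
  | succ n ih =>
    intro i hi
    by_cases hcase : rck_hit kws (h[n]?.getD []) = true
    · simp [rckA_scan, hcase] at hi
      exact ⟨n, hi.symm, Nat.lt_succ_self n⟩
    · simp [rckA_scan, hcase] at hi
      obtain ⟨j, hj, hjn⟩ := ih i hi
      exact ⟨j, hj, Nat.lt_succ_of_lt hjn⟩

-- B's collection over the reversed first n messages computes the reversed suffix
-- from A's backward-scan index over those n messages.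
lemma rck_collect_eq_scan (h : List (List (String × String))) (kws : List String) :
    ∀ n, n ≤ h.length →
      rckB_collect kws ((h.take n).reverse)
        = (rckA_scan h kws n).map (fun i => ((h.take n).drop i.toNat).reverse) := by
  intro n
  induction n with
  | zero => intro _; simp [rckA_scan, rckB_collect]
  | succ n ih =>
    intro hn
    have hlt : n < h.length := Nat.lt_of_succ_le hn
    have htake : h.take (n+1) = h.take n ++ [h[n]] := by
      rw [List.take_add_one]; simp [List.getElem?_eq_getElem hlt]
    have hlen : (h.take n).length = n := by simp [Nat.le_of_lt hlt]
    rw [htake]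
    by_cases hcase : rck_hit kws h[n] = true
    · rw [List.reverse_append]
      simp only [List.reverse_singleton, List.singleton_append]
      rw [rckB_collect]
      have hscan : rckA_scan h kws (n+1) = some (n : Int) := by
        simp [rckA_scan, List.getElem?_eq_getElem hlt, hcase]
      rw [hcase, if_pos rfl, hscan]
      simp only [Option.map_some, Int.toNat_natCast, Option.some.injEq]
      rw [List.drop_append_of_le_length (le_of_eq hlen.symm)]
      simp
    · rw [List.reverse_append]
      simp only [List.reverse_singleton, List.singleton_append]
      rw [rckB_collect]
      simp only [hcase]
      rw [ih (Nat.le_of_lt hlt)]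
      have hscan : rckA_scan h kws (n+1) = rckA_scan h kws n := by
        simp [rckA_scan, List.getElem?_eq_getElem hlt, hcase]
      rw [hscan]
      cases hs : rckA_scan h kws n with
      | none => simp
      | some i =>
        obtain ⟨j, hj, hjn⟩ := rckA_scan_lt h kws n i hs
        subst hj
        simp only [Option.map_some, Option.some.injEq]
        rw [List.drop_append_of_le_length (by simp [hlen]; omega),
          List.reverse_append]
        simp

-- ===== VERDICT (by name: the statement is the Claim_ definition above) =====
theorem refresh_chat_after_keyword_py_spec : Claim_equal_refresh_chat_after_keyword_py := by
  intro h cd kw _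
  unfold Spec_refresh_chat_after_keyword_py refresh_chat_after_keyword_py refresh_chat_after_keyword_py_alt
  dsimp only
  rw [show h.reverse = (h.take h.length).reverse by simp,
    rck_collect_eq_scan h (rck_keywords kw) h.length (Nat.le_refl _)]
  cases hs : rckA_scan h (rck_keywords kw) h.length with
  | none => simp
  | some i =>
    obtain ⟨j, hj, _⟩ := rckA_scan_lt h (rck_keywords kw) h.length i hs
    subst hj
    simp [PySem.List.slice_from_natCast]
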